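-- pv_equiv track=rewrite | github.com/nackerley/obspy | obspy/clients/fdsn/routers/fedcatalog_client.py | distribute_args
-- ===== SOURCE A (Python) =====
-- def distribute_args(argdict):
--     """
--     divide a dictionary's keys between fedcatalog and provider's service
--
--     When the FederatedClient is called with a bunch of keyword arguments,
--     it should call the Fedcatalog service with a large subset of these.
--     Most will be incorporated into the bulk data requests that will be
--     sent to the client's service. However a few of these are not allowed
--     to be passed in this way.  These are prohibited, and will be removed
--     from the fedcat_kwargs.
--
--     The client's service will not need most of these keywords, since
--     they are included in the bulk request.  However, some keywords are
--     required by the Client class, so they are allowed through.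
--
--     :type argdict: dict
--     :param argdict: keyword arugments that were passed to the FederatedClient
--     :rtype: tuple(dict() , dict())
--     :returns: tuple of dictionaries fedcat_kwargs, fdsn_kwargs
--     """
--
--     fedcatalog_prohibited_params = ('filename', 'attach_response', 'user', 'password', 'base_url')
--     service_params = ('user', 'password', 'attach_response', 'filename')
--
--     # fedrequest gets almost all arguments, except for some
--     fed_argdict = argdict.copy()
--     for key in fedcatalog_prohibited_params:
--         if key in fed_argdict:
--             del fed_argdict[key]
--
--     # services get practically no arguments, since they're provided by the bulk request
--     service_args = dict()
--     for key in service_params: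
--         if key in argdict:
--             service_args[key] = argdict[key]
--     return fed_argdict, service_args
-- ===== SOURCE B (Python) =====
-- _PROHIBITED = frozenset(('filename', 'attach_response', 'user', 'password', 'base_url'))
-- _SERVICE_ORDER = ('user', 'password', 'attach_response', 'filename')
--
--
-- def distribute_args(argdict):
--     """Single classifying pass over argdict instead of copy-then-delete
--     plus a separate fixed-key scan of argdict."""
--     fed_argdict = {}
--     found = {}
--     for key, value in argdict.items():
--         if key in _PROHIBITED:
--             if key != 'base_url':
--                 found[key] = value
--         else:
--             fed_argdict[key] = value
--     service_args = {key: found[key] for key in _SERVICE_ORDER if key in found}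
--     return fed_argdict, service_args
-- ===== Notes on version B (the rewrite author's own statement) =====
-- stated objective: alternative
-- what changed: A copies the whole dict and then deletes each of five prohibited keys, followed by a second fixed-key scan of argdict for the service keys; B makes one data-driven classifying pass over argdict.items() that populates fed and a found dict at once, then emits service_args from found in the fixed key order.
import Mathlib
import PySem

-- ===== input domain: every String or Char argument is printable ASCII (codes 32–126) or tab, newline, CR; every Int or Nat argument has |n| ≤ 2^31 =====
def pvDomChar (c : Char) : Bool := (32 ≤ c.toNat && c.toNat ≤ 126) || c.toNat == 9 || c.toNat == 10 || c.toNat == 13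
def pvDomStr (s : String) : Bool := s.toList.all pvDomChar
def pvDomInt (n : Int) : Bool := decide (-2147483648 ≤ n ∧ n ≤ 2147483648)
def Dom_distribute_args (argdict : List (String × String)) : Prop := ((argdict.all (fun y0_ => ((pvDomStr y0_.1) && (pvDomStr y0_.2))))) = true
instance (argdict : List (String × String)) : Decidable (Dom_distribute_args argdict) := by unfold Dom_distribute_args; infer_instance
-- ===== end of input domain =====

-- B replaces A's copy-then-delete pass plus separate fixed-key scan of argdict by ONE
-- classifying pass over argdict's items (objective: alternative decomposition, not faster).

-- ===== PORT A =====
def fedcatalogProhibitedParams : List String :=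
  ["filename", "attach_response", "user", "password", "base_url"]

def serviceParams : List String :=
  ["user", "password", "attach_response", "filename"]

def distribute_args (argdict : List (String × String)) :
    (List (String × String)) × (List (String × String)) :=
  -- fed_argdict = argdict.copy(); for key in prohibited: if key in fed_argdict: del fed_argdict[key]
  let fed := fedcatalogProhibitedParams.foldl
    (fun d k => if d.contains k then d.erase k else d) (PySem.Dict.mk argdict)
  -- service_args = dict(); for key in service_params: if key in argdict: service_args[key] = argdict[key]
  -- (getD's default is never used: the lookup sits under the 'contains' guard)
  let service := serviceParams.foldl
    (fun d k => if (PySem.Dict.mk argdict).contains k then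
        d.insert k ((PySem.Dict.mk argdict).getD k "") else d)
    PySem.Dict.empty
  (fed.items, service.items)

-- ===== PORT B =====
def pvProhibited : List String :=
  ["filename", "attach_response", "user", "password", "base_url"]

def pvServiceOrder : List String :=
  ["user", "password", "attach_response", "filename"]

def distribute_args_alt (argdict : List (String × String)) :
    (List (String × String)) × (List (String × String)) :=
  -- one pass: for key, value in argdict.items(): classify into fed / found
  let st := argdict.foldl
    (fun (p : PySem.Dict String String × PySem.Dict String String) kv =>
      if pvProhibited.contains kv.1 then
        if kv.1 ≠ "base_url" then (p.1, p.2.insert kv.1 kv.2) else p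
      else (p.1.insert kv.1 kv.2, p.2))
    (PySem.Dict.empty, PySem.Dict.empty)
  -- service_args = {key: found[key] for key in _SERVICE_ORDER if key in found}
  let service := pvServiceOrder.foldl
    (fun d k => if st.2.contains k then d.insert k (st.2.getD k "") else d)
    PySem.Dict.empty
  (st.1.items, service.items)

-- ===== PRECONDITION & SPEC =====
-- Pre_ excludes association lists with duplicate keys: the Python parameter is a dict, whose
-- keys are necessarily distinct; a duplicate-key list does not represent any dict argument and
-- whatever the assoc-list ports do there is accidental.
def Pre_distribute_args (argdict : List (String × String)) : Prop :=
  (argdict.map Prod.fst).Nodup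
instance (argdict : List (String × String)) : Decidable (Pre_distribute_args argdict) := by
  unfold Pre_distribute_args; infer_instance

def pvWitness_distribute_args : (List (String × String)) :=
  [("network", "IU"), ("user", "nobody"), ("base_url", "IRIS")]

def Spec_distribute_args (argdict : List (String × String)) (out : (List (String × String)) × (List (String × String))) : Prop := out = distribute_args_alt argdict
instance (argdict : List (String × String)) (out : (List (String × String)) × (List (String × String))) : Decidable (Spec_distribute_args argdict out) := by unfold Spec_distribute_args; infer_instance

-- ===== CLAIM (what is proved, stated in full; the proofs are below) =====
def Claim_equal_distribute_args : Prop := ∀ (argdict : List (String × String)), Dom_distribute_args argdict → Pre_distribute_args argdict → Spec_distribute_args argdict (distribute_args argdict)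

-- ===== LEMMAS AND PROOFS =====

-- keep-predicate of A's deletion pass / of B's fed branch
def pvKeep (p : String × String) : Bool := !(pvProhibited.contains p.1)
-- membership predicate of B's found dict (prohibited but not base_url), on the key alone
def pvServK (k : String) : Bool := pvProhibited.contains k && k != "base_url"

theorem pv_any_eq_isSome {a : Type} (p : a -> Bool) (l : List a) :
    l.any p = (l.find? p).isSome := by
  induction l with
  | nil => rfl
  | cons x l ih => cases h : p x <;> simp [h, ih]

theorem pv_contains_eq_isSome {k v : Type} [BEq k] (d : PySem.Dict k v) (x : k) :
    d.contains x = (d.get? x).isSome := by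
  simp [PySem.Dict.contains, PySem.Dict.get?, pv_any_eq_isSome]

-- A's guarded delete is just erase (erasing an absent key is the identity)
theorem pv_condErase (d : PySem.Dict String String) (k : String) :
    (if d.contains k then d.erase k else d) = d.erase k := by
  by_cases h : d.contains k = true
  · rw [if_pos h]
  · rw [if_neg h]
    apply PySem.Dict.ext
    symm
    simp only [PySem.Dict.erase]
    rw [List.filter_eq_self]
    intro p hp
    simp only [Bool.not_eq_true] at h
    have := List.any_eq_false.mp h p hp
    simpa using this

theorem pv_fun_eq :
    (fun (d : PySem.Dict String String) k => if d.contains k then d.erase k else d)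
      = fun (d : PySem.Dict String String) k => d.erase k :=
  funext fun d => funext fun k => pv_condErase d k

-- A's deletion loop computes a filter of the items
theorem pv_eraseFold (ks : List String) (d : PySem.Dict String String) :
    ((ks.foldl (fun d k => d.erase k) d).items)
      = d.items.filter (fun p => !(ks.contains p.1)) := by
  induction ks generalizing d with
  | nil => simp
  | cons k ks ih =>
    rw [List.foldl_cons, ih]
    simp only [PySem.Dict.erase, List.filter_filter]
    apply List.filter_congr
    intro p _
    by_cases h : p.1 = k <;> simp [h]

theorem pv_insert_fresh (d : PySem.Dict String String) (k : String) (v : String)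
    (hd : d.contains k = false) : (d.insert k v).items = d.items ++ [(k, v)] := by
  simp [PySem.Dict.insert, hd]

-- B's classifying pass: fed collects the kept pairs, found the service-relevant ones
theorem pv_classify (l : List (String × String))
    (f g : PySem.Dict String String)
    (hf : ∀ p ∈ l, f.contains p.1 = false) (hg : ∀ p ∈ l, g.contains p.1 = false)
    (hn : (l.map Prod.fst).Nodup) :
    l.foldl
      (fun (p : PySem.Dict String String × PySem.Dict String String) kv =>
        if pvProhibited.contains kv.1 then
          if kv.1 ≠ "base_url" then (p.1, p.2.insert kv.1 kv.2) else p
        else (p.1.insert kv.1 kv.2, p.2)) (f, g)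
      = (PySem.Dict.mk (f.items ++ l.filter pvKeep),
         PySem.Dict.mk (g.items ++ l.filter (fun p => pvServK p.1))) := by
  induction l generalizing f g with
  | nil => simp
  | cons kv l ih =>
    obtain ⟨k, v⟩ := kv
    simp only [List.map_cons, List.nodup_cons] at hn
    have hknl : ∀ p ∈ l, (k == p.1) = false := by
      intro p hp
      have : k ≠ p.1 := fun h => hn.1 (h ▸ List.mem_map_of_mem hp)
      simpa using this
    have hfl : ∀ p ∈ l, f.contains p.1 = false := fun p hp => hf p (List.mem_cons_of_mem _ hp)
    have hgl : ∀ p ∈ l, g.contains p.1 = false := fun p hp => hg p (List.mem_cons_of_mem _ hp)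
    have hins : ∀ (d : PySem.Dict String String), d.contains k = false →
        (∀ p ∈ l, d.contains p.1 = false) → ∀ p ∈ l, (d.insert k v).contains p.1 = false := by
      intro d hd hdl p hp
      simp only [PySem.Dict.contains, pv_insert_fresh d k v hd, List.any_append, List.any_cons,
        List.any_nil, Bool.or_false]
      rw [show (d.items.any fun q => q.1 == p.1) = false from hdl p hp, hknl p hp]
      rfl
    rw [List.foldl_cons]
    by_cases hc : pvProhibited.contains k = true
    · have hcm : k ∈ pvProhibited := by simpa using hc
      by_cases hb : k = "base_url"
      · have hS : pvServK k = false := by simp [pvServK, hb]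
        have hK : pvKeep (k, v) = false := by simp [pvKeep, hcm]
        rw [if_pos hc, if_neg (not_not_intro hb)]
        rw [ih f g hfl hgl hn.2]
        simp [hS, hK]
      · have hS : pvServK k = true := by simp [pvServK, hcm, hb]
        have hK : pvKeep (k, v) = false := by simp [pvKeep, hcm]
        have hgk : g.contains k = false := hg (k, v) List.mem_cons_self
        rw [if_pos hc, if_pos hb]
        rw [ih f (g.insert k v) hfl (hins g hgk hgl) hn.2]
        simp [hS, hK, pv_insert_fresh g k v hgk]
    · have hcm : k ∉ pvProhibited := by simpa using hc
      have hS : pvServK k = false := by simp [pvServK, hcm]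
      have hK : pvKeep (k, v) = true := by simp [pvKeep, hcm]
      have hfk : f.contains k = false := hf (k, v) List.mem_cons_self
      rw [if_neg hc]
      rw [ih (f.insert k v) g (hins f hfk hfl) hgl hn.2]
      simp [hS, hK, pv_insert_fresh f k v hfk]

-- lookup through a key-filtered list is unchanged when the key passes the filter
theorem pv_find_filter (l : List (String × String)) (q : String -> Bool) (k : String)
    (hq : q k = true) :
    (l.filter (fun p => q p.1)).find? (fun p => p.1 == k) = l.find? (fun p => p.1 == k) := by
  induction l with
  | nil => simp
  | cons a l ih =>
    by_cases h : a.1 = k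
    · simp [h, hq]
    · have hb : (a.1 == k) = false := by simpa using h
      cases hqa : q a.1 <;> simp [hqa, hb, ih]

-- ===== VERDICT (by name: the statement is the Claim_ definition above) =====
theorem distribute_args_spec : Claim_equal_distribute_args := by
  intro argdict _ hpre
  show distribute_args argdict = distribute_args_alt argdict
  have hempty : ∀ (x : String), (PySem.Dict.empty (κ := String) (ν := String)).contains x = false :=
    fun _ => rfl
  have hcls := pv_classify argdict PySem.Dict.empty PySem.Dict.empty
      (fun p _ => hempty p.1) (fun p _ => hempty p.1) hpre
  refine Prod.ext ?_ ?_
  · show (List.foldl (fun (d : PySem.Dict String String) k => if d.contains k then d.erase k else d)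
        (PySem.Dict.mk argdict) fedcatalogProhibitedParams).items
      = ((argdict.foldl
          (fun (p : PySem.Dict String String × PySem.Dict String String) kv =>
            if pvProhibited.contains kv.1 then
              if kv.1 ≠ "base_url" then (p.1, p.2.insert kv.1 kv.2) else p
            else (p.1.insert kv.1 kv.2, p.2))
          (PySem.Dict.empty, PySem.Dict.empty)).1).items
    rw [hcls, pv_fun_eq, pv_eraseFold]
    rfl
  · show (List.foldl
        (fun (d : PySem.Dict String String) k => if (PySem.Dict.mk argdict).contains k then
            d.insert k ((PySem.Dict.mk argdict).getD k "") else d)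
        PySem.Dict.empty serviceParams).items
      = (List.foldl
          (fun (d : PySem.Dict String String) k =>
            if ((argdict.foldl
                (fun (p : PySem.Dict String String × PySem.Dict String String) kv =>
                  if pvProhibited.contains kv.1 then
                    if kv.1 ≠ "base_url" then (p.1, p.2.insert kv.1 kv.2) else p
                  else (p.1.insert kv.1 kv.2, p.2))
                (PySem.Dict.empty, PySem.Dict.empty)).2).contains k then
              d.insert k (((argdict.foldl
                (fun (p : PySem.Dict String String × PySem.Dict String String) kv =>
                  if pvProhibited.contains kv.1 then
                    if kv.1 ≠ "base_url" then (p.1, p.2.insert kv.1 kv.2) else p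
                  else (p.1.insert kv.1 kv.2, p.2))
                (PySem.Dict.empty, PySem.Dict.empty)).2).getD k "") else d)
          PySem.Dict.empty pvServiceOrder).items
    rw [hcls]
    have hitems : ((PySem.Dict.empty (κ := String) (ν := String)).items
          ++ argdict.filter (fun p => pvServK p.1)) = argdict.filter (fun p => pvServK p.1) := by
      simp [PySem.Dict.empty]
    have hstep : ∀ (acc : PySem.Dict String String), ∀ k ∈ pvServiceOrder,
        (if (PySem.Dict.mk argdict).contains k then
            acc.insert k ((PySem.Dict.mk argdict).getD k "") else acc)
          = (if (PySem.Dict.mk ((PySem.Dict.empty (κ := String) (ν := String)).items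
                ++ argdict.filter (fun p => pvServK p.1))).contains k then
              acc.insert k ((PySem.Dict.mk ((PySem.Dict.empty (κ := String) (ν := String)).items
                ++ argdict.filter (fun p => pvServK p.1))).getD k "") else acc) := by
      intro acc k hk
      rw [hitems]
      have hqk : pvServK k = true := by
        simp only [pvServiceOrder, List.mem_cons, List.not_mem_nil, or_false] at hk
        rcases hk with h | h | h | h <;> subst h <;> decide
      have hget : (PySem.Dict.mk (argdict.filter (fun p => pvServK p.1))).get? k
            = (PySem.Dict.mk argdict).get? k := by
        simp only [PySem.Dict.get?]
        rw [pv_find_filter argdict pvServK k hqk]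
      have hcont : (PySem.Dict.mk (argdict.filter (fun p => pvServK p.1))).contains k
            = (PySem.Dict.mk argdict).contains k := by
        rw [pv_contains_eq_isSome, pv_contains_eq_isSome, hget]
      rw [hcont]
      simp only [PySem.Dict.getD, hget]
    show (List.foldl
        (fun (d : PySem.Dict String String) k => if (PySem.Dict.mk argdict).contains k then
            d.insert k ((PySem.Dict.mk argdict).getD k "") else d)
        PySem.Dict.empty pvServiceOrder).items
      = (List.foldl
          (fun (d : PySem.Dict String String) k =>
            if (PySem.Dict.mk ((PySem.Dict.empty (κ := String) (ν := String)).items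
                  ++ argdict.filter (fun p => pvServK p.1))).contains k then
              d.insert k ((PySem.Dict.mk ((PySem.Dict.empty (κ := String) (ν := String)).items
                  ++ argdict.filter (fun p => pvServK p.1))).getD k "") else d)
          PySem.Dict.empty pvServiceOrder).items
    rw [PySem.List.foldl_congr_mem pvServiceOrder _ _ PySem.Dict.empty hstep]
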